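-- pv_equiv track=rewrite | github.com/RobLaughlin/LeetcodeSolutions | (393) UTF-8 Validation.py | charPreamble
-- ===== SOURCE A (Python) =====
-- def charPreamble(char):
--     # Returns the first 5 bits of a given character,
--     # along with the type of preamble it is.
--
--     # TYPES:
--     # -1: Invalid preamble
--     # 0: Seqential byte, starts with '10'
--     # >= 1: Size of character in bytes
--
--     # Split off insignificant digits
--     for _ in range(3):
--         char = (char - (char % 2)) // 2
--
--     preamble = [0, 0, 0, 0, 0]
--     for j in range(len(preamble)-1, -1, -1):
--         digit = char % 2
--         preamble[j] = digit
--         char = (char - digit) // 2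
--
--     # 1 byte preamble
--     if preamble[0] == 0:
--         return preamble, 1
--
--     # Sequential byte
--     if preamble[1] == 0:
--         return preamble, 0
--
--     size = 2
--     for p in preamble[2:]:
--         if p != 1:
--             return preamble, size
--
--         size += 1
--
--     # All 1's is an invalid preamble.
--     return preamble, -1
-- ===== SOURCE B (Python) =====
-- def charPreamble(char):
--     # Arithmetic reformulation: collapse the top-5-bit field into one number v,
--     # read the bit list off v, and pick the type by numeric thresholds on v.
--     v = (char >> 3) & 31
--     bits = [int(b) for b in format(v, '05b')]
--     t = 1 if v < 16 else 0 if v < 24 else 2 if v < 28 else 3 if v < 30 else 4 if v < 31 else -1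
--     return bits, t
-- ===== Notes on version B (the rewrite author's own statement) =====
-- stated objective: simpler
-- what changed: A inspects a bit list with staged branches and a counting loop; B has no loops over bits at all: it collapses the five-bit field into a single number v via shift-and-mask, reads the digit list directly off v, and selects the type by a chain of numeric threshold comparisons on v.
import Mathlib
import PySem

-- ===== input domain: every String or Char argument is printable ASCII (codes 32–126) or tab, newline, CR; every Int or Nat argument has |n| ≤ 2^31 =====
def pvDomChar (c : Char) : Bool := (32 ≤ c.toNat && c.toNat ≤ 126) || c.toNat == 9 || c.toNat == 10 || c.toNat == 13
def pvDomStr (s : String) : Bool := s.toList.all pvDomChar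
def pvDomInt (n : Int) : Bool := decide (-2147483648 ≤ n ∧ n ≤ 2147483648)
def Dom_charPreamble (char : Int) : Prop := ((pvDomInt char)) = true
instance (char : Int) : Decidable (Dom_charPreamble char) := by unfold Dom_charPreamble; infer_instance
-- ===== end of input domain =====

-- B replaces A's bit-list branches and counting loop by one numeric value v = (char>>3)&31
-- with threshold comparisons for the type (objective: simpler, loop-free decomposition).


-- ===== PORT A =====
-- 'for p in preamble[2:]: if p != 1: return preamble, size; size += 1' with the final return
def charPreambleSizeLoop (preamble : List Int) : List Int → Int → List Int × Int
  | [], _ => (preamble, -1)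
  | p :: rest, size =>
      if p ≠ 1 then (preamble, size)
      else charPreambleSizeLoop preamble rest (size + 1)

def charPreamble (char : Int) : List Int × Int :=
  -- for _ in range(3): char = (char - (char % 2)) // 2
  let char := (PySem.List.pyRange 0 3 1).foldl
      (fun c _ => PySem.Int.floordiv (c - PySem.Int.mod c 2) 2) char
  -- for j in range(len(preamble)-1, -1, -1): …
  let st := (PySem.List.pyRange (5 - 1) (-1) (-1)).foldl
      (fun (st : List Int × Int) j =>
        let digit := PySem.Int.mod st.2 2
        (PySem.List.pySetD st.1 j digit, PySem.Int.floordiv (st.2 - digit) 2))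
      ([0, 0, 0, 0, 0], char)
  let preamble := st.1
  if PySem.List.pyGetD preamble 0 0 = 0 then (preamble, 1)
  else if PySem.List.pyGetD preamble 1 0 = 0 then (preamble, 0)
  else charPreambleSizeLoop preamble (PySem.List.slice preamble (some 2) none) 2

-- ===== PORT B =====
def charPreamble_alt (char : Int) : List Int × Int :=
  -- v = (char >> 3) & 31  (>> 3 is floor division by 8; & 31 on the nonneg mask is mod 32)
  let v := PySem.Int.band (char >>> (3 : Nat)) 31
  -- [int(b) for b in format(v, '05b')]: 0 ≤ v < 32, so the five zero-padded binary
  -- digits are exactly these quotient parities (MSB first) — exact on that range.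
  let bits : List Int := [v / 16 % 2, v / 8 % 2, v / 4 % 2, v / 2 % 2, v % 2]
  let t : Int :=
    if v < 16 then 1 else if v < 24 then 0 else if v < 28 then 2
    else if v < 30 then 3 else if v < 31 then 4 else -1
  (bits, t)

-- ===== PRECONDITION & SPEC =====
def Spec_charPreamble (char : Int) (out : List Int × Int) : Prop := out = charPreamble_alt char
instance (char : Int) (out : List Int × Int) : Decidable (Spec_charPreamble char out) := by unfold Spec_charPreamble; infer_instance

-- ===== CLAIM (what is proved, stated in full; the proofs are below) =====
def Claim_equal_charPreamble : Prop := ∀ (char : Int), Dom_charPreamble char → Spec_charPreamble char (charPreamble char)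

-- ===== LEMMAS AND PROOFS =====

-- v = a & 31 is a % 32 for every Int (Python two's complement), via the Nat mask identity.
theorem charPreamble_band31 (a : Int) : PySem.Int.band a 31 = a % 32 := by
  unfold PySem.Int.band
  split_ifs with h1 h2 h2
  · rw [show ((31 : Int).toNat = 31) from rfl, show (31 : Nat) = 2 ^ 5 - 1 from rfl,
      Nat.and_two_pow_sub_one_eq_mod]
    omega
  · norm_num at h2
  · rw [show ((31 : Int).toNat = 31) from rfl, Nat.and_comm,
      show (31 : Nat) = 2 ^ 5 - 1 from rfl, Nat.and_two_pow_sub_one_eq_mod]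
    omega
  · norm_num at h2

-- With u = char // 8, A's five extracted bits are the parities of u/16 … u and B's value
-- v equals u % 32; reduce both sides to v and exhaust its 32 possible values.
theorem charPreamble_bridge (u : Int) :
    (if 2 ∣ u / 16 then ([u/16 % 2, u/8 % 2, u/4 % 2, u/2 % 2, u % 2], (1 : Int))
     else if 2 ∣ u / 8 then ([u/16 % 2, u/8 % 2, u/4 % 2, u/2 % 2, u % 2], 0)
     else charPreambleSizeLoop [u/16 % 2, u/8 % 2, u/4 % 2, u/2 % 2, u % 2]
            [u/4 % 2, u/2 % 2, u % 2] 2)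
    = ([(u % 32) / 16 % 2, (u % 32) / 8 % 2, (u % 32) / 4 % 2, (u % 32) / 2 % 2, u % 2],
       if u % 32 < 16 then 1 else if u % 32 < 24 then 0 else if u % 32 < 28 then 2
       else if u % 32 < 30 then 3 else if u % 32 < 31 then 4 else -1) := by
  have hd0 : (2 ∣ u / 16) ↔ (u % 32) / 16 % 2 = 0 := by omega
  have hd1 : (2 ∣ u / 8) ↔ (u % 32) / 8 % 2 = 0 := by omega
  have e0 : u / 16 % 2 = (u % 32) / 16 % 2 := by omega
  have e1 : u / 8 % 2 = (u % 32) / 8 % 2 := by omega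
  have e2 : u / 4 % 2 = (u % 32) / 4 % 2 := by omega
  have e3 : u / 2 % 2 = (u % 32) / 2 % 2 := by omega
  have e4 : u % 2 = (u % 32) % 2 := by omega
  simp only [hd0, hd1]
  rw [e0, e1, e2, e3, e4]
  have hl : 0 ≤ u % 32 := by omega
  have hr : u % 32 < 32 := by omega
  generalize u % 32 = v at hl hr ⊢
  interval_cases v <;> decide

-- ===== VERDICT (by name: the statement is the Claim_ definition above) =====
theorem charPreamble_spec : Claim_equal_charPreamble := by
  intro char _
  unfold Spec_charPreamble
  have hr3 : PySem.List.pyRange 0 3 1 = [0, 1, 2] := by decide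
  have hr5 : PySem.List.pyRange (5 - 1) (-1) (-1) = [4, 3, 2, 1, 0] := by decide
  have hmod : ∀ c : Int, PySem.Int.mod c 2 = c % 2 := fun c =>
    PySem.Int.mod_eq_emod_of_pos (by norm_num)
  have hfd : ∀ c b : Int, 0 < b → PySem.Int.floordiv c b = c / b := fun c b h =>
    PySem.Int.floordiv_eq_ediv_of_pos h
  have hcol : ∀ c : Int, (c - c % 2) / 2 = c / 2 := by intro c; omega
  have d4 : char / 2 / 2 = char / 4 := by omega
  have d8 : char / 4 / 2 = char / 8 := by omega
  have d16 : char / 8 / 2 = char / 16 := by omega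
  have d32 : char / 16 / 2 = char / 32 := by omega
  have d64 : char / 32 / 2 = char / 64 := by omega
  have d128 : char / 64 / 2 = char / 128 := by omega
  have q0 : char / 128 = char / 8 / 16 := by omega
  have q1 : char / 64 = char / 8 / 8 := by omega
  have q2 : char / 32 = char / 8 / 4 := by omega
  have q3 : char / 16 = char / 8 / 2 := by omega
  have hshift : char >>> (3 : Nat) = char / 8 := by
    have := Int.shiftRight_eq_div_pow char 3
    simpa using this
  have hset : ∀ v w x y z : Int,
      (((([(0 : Int), 0, 0, 0, 0].set (Int.toNat 4) z).set (Int.toNat 3) y).set (Int.toNat 2) x).set 1 w).set 0 v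
        = [v, w, x, y, z] := fun _ _ _ _ _ => rfl
  have htake : ∀ v w x y z : Int,
      List.take (5 - Int.toNat 2) (List.drop (Int.toNat 2) [v, w, x, y, z]) = [x, y, z] :=
    fun _ _ _ _ _ => rfl
  simp only [charPreamble, charPreamble_alt, hr3, hr5, List.foldl, hmod, hshift,
    charPreamble_band31]
  norm_num [hfd, hcol, d4, d8, d16, d32, d64, d128,
    PySem.List.pySetD_of_nonneg, PySem.List.pyGetD, PySem.List.pyGet?, PySem.List.pyIdx?,
    PySem.List.slice]
  simp only [hset, htake] at *
  rw [q0, q1, q2, q3]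
  exact charPreamble_bridge (char / 8)
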